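-- pv_equiv track=rewrite | github.com/edifoster/AdventOfCode | 2020/2020day6.py | check_common_yes_answers_in_group
-- ===== SOURCE A (Python) =====
-- def check_common_yes_answers_in_group(group_answers):
--     d = 0
--     common_yes = group_answers[0]
--     while d < len(group_answers[0]):
--         e = 0
--         while e < len(group_answers):
--             if group_answers[0][d] not in group_answers[e]:
--                 common_yes = common_yes.replace(group_answers[0][d], '')
--                 e = len(group_answers)
--             e += 1
--         d += 1
--     return common_yes, len(common_yes)
-- ===== SOURCE B (Python) =====
-- def check_common_yes_answers_in_group(group_answers):
--     first = group_answers[0]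
--     common = set(first)
--     for answer in group_answers:
--         common &= set(answer)
--     result = ''.join(c for c in first if c in common)
--     return result, len(result)
-- ===== Notes on version B (the rewrite author's own statement) =====
-- stated objective: simpler
-- what changed: A's nested index loops with early-break and repeated string.replace are replaced by building the intersection set of all answers in one pass and then filtering the first string once.
import Mathlib
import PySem

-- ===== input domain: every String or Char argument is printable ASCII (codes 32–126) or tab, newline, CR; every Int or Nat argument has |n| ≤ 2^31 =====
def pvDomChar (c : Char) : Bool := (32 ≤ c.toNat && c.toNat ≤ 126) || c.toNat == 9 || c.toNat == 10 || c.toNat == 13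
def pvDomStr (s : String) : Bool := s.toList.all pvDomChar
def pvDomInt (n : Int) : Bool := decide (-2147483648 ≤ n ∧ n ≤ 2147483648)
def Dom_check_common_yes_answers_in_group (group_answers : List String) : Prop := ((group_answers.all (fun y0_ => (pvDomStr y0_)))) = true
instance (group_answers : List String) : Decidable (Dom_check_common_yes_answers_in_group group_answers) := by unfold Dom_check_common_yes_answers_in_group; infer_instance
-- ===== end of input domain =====

-- B replaces A's nested index loops (early-break inner scan + repeated string.replace)
-- by one pass building the set intersection of all answers and one filter pass over the
-- first answer; objective: simpler.

-- ===== PORT A =====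
-- inner 'while e < len(group_answers)' loop: on the first answer not containing c,
-- remove every occurrence of c from common (the 'e = len(group_answers)' break)
def pvAInner (gs : List (List Char)) (c : Char) (common : List Char) (e : Nat) : List Char :=
  if h : e < gs.length then
    if PySem.Chars.isIn [c] gs[e] then pvAInner gs c common (e + 1)
    else PySem.Chars.replace common [c] []
  else common
termination_by gs.length - e

-- outer 'while d < len(group_answers[0])' loop over the positions of the first answer
def pvAOuter (gs : List (List Char)) (s0 : List Char) (d : Nat) (common : List Char) : List Char :=
  if h : d < s0.length then pvAOuter gs s0 (d + 1) (pvAInner gs s0[d] common 0)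
  else common
termination_by s0.length - d

def check_common_yes_answers_in_group (group_answers : List String) : String × Int :=
  let s0 := ((PySem.List.pyGet? group_answers 0).getD "").toList
  let r := pvAOuter (group_answers.map String.toList) s0 0 s0
  (String.ofList r, (r.length : Int))

-- ===== PORT B =====
def check_common_yes_answers_in_group_alt (group_answers : List String) : String × Int :=
  let first := ((PySem.List.pyGet? group_answers 0).getD "").toList
  let common : PySem.Set Char :=
    group_answers.foldl (fun acc a => PySem.Set.inter acc (PySem.Set.ofList a.toList))
      (PySem.Set.ofList first)
  let r := first.filter (fun c => PySem.Set.contains common c)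
  (String.ofList r, (r.length : Int))

-- ===== PRECONDITION & SPEC =====
-- Pre_ excludes only the empty list, on which the Python A raises IndexError (group_answers[0]).
def Pre_check_common_yes_answers_in_group (group_answers : List String) : Prop :=
  group_answers ≠ []
instance (group_answers : List String) : Decidable (Pre_check_common_yes_answers_in_group group_answers) := by unfold Pre_check_common_yes_answers_in_group; infer_instance

def pvWitness_check_common_yes_answers_in_group : List String := ["abcab", "bca", "ab"]

def Spec_check_common_yes_answers_in_group (group_answers : List String) (out : String × Int) : Prop := out = check_common_yes_answers_in_group_alt group_answers
instance (group_answers : List String) (out : String × Int) : Decidable (Spec_check_common_yes_answers_in_group group_answers out) := by unfold Spec_check_common_yes_answers_in_group; infer_instance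

-- ===== CLAIM (what is proved, stated in full; the proofs are below) =====
def Claim_equal_check_common_yes_answers_in_group : Prop := ∀ (group_answers : List String), Dom_check_common_yes_answers_in_group group_answers → Pre_check_common_yes_answers_in_group group_answers → Spec_check_common_yes_answers_in_group group_answers (check_common_yes_answers_in_group group_answers)

-- ===== LEMMAS AND PROOFS =====

-- s.replace(c, '') for a single character c is a filter
theorem pv_replace_go_single (c : Char) (fuel : Nat) :
    ∀ (l acc : List Char), l.length ≤ fuel →
      PySem.Chars.replace.go [c] [] fuel l acc = acc.reverse ++ l.filter (· ≠ c) := by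
  induction fuel with
  | zero =>
    intro l acc h
    have : l = [] := List.length_eq_zero_iff.mp (Nat.le_zero.mp h)
    subst this
    simp [PySem.Chars.replace.go]
  | succ n ih =>
    intro l acc h
    cases l with
    | nil => simp [PySem.Chars.replace.go]
    | cons x t =>
      by_cases hx : x = c
      · subst hx
        have hpre : [x].isPrefixOf (x :: t) = true := by simp [List.isPrefixOf]
        rw [PySem.Chars.replace.go]
        simp only [hpre, if_pos, List.length_cons, List.length_nil, Nat.zero_add,
          List.drop_succ_cons, List.drop_zero, List.reverse_nil, List.nil_append]
        rw [ih t acc (Nat.le_of_succ_le_succ h)]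
        simp
      · have hpre : [c].isPrefixOf (x :: t) = false := by
          simp [List.isPrefixOf]
          exact fun hcx => hx hcx.symm
        rw [PySem.Chars.replace.go]
        rw [if_neg (by simp [hpre])]
        rw [ih t (x :: acc) (Nat.le_of_succ_le_succ h)]
        simp [hx]

theorem pv_replace_single (s : List Char) (c : Char) :
    PySem.Chars.replace s [c] [] = s.filter (· ≠ c) := by
  rw [PySem.Chars.replace]
  simp only [List.isEmpty_cons, Bool.false_eq_true, if_false]
  exact pv_replace_go_single c s.length s [] (le_refl _)

theorem pv_isIn_single (c : Char) (s : List Char) :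
    PySem.Chars.isIn [c] s = s.contains c := by
  by_cases h : c ∈ s
  · simp [PySem.Chars.isIn_iff_infix, (List.singleton_infix_iff c s).mpr h, h]
  · have h1 : PySem.Chars.isIn [c] s = false := by
      rw [PySem.Chars.isIn_eq_false_iff, List.singleton_infix_iff]; exact h
    simp [h1, h]

-- the inner loop removes c from common iff some answer misses c
theorem pv_inner_eq (gs : List (List Char)) (c : Char) (common : List Char) (e : Nat) :
    pvAInner gs c common e =
      if (gs.drop e).all (·.contains c) then common else common.filter (· ≠ c) := by
  fun_induction pvAInner gs c common e with
  | case1 e h hin ih =>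
    rw [pv_isIn_single] at hin
    rw [ih, List.drop_eq_getElem_cons h]
    simp only [List.all_cons, hin, Bool.true_and]
  | case2 e h hin =>
    rw [pv_isIn_single] at hin
    simp only [Bool.not_eq_true] at hin
    rw [pv_replace_single, if_neg]
    rw [List.drop_eq_getElem_cons h]
    simp only [List.all_cons, hin, Bool.false_and, Bool.false_eq_true, not_false_eq_true]
  | case3 e h =>
    have hd : gs.drop e = [] := List.drop_eq_nil_of_le (by omega)
    simp [hd]

-- the outer loop keeps exactly the characters common to all answers (or absent from s0.drop d)
theorem pv_outer_eq (gs : List (List Char)) (s0 : List Char) (d : Nat) (common : List Char) :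
    pvAOuter gs s0 d common =
      common.filter (fun x => gs.all (·.contains x) || !((s0.drop d).contains x)) := by
  fun_induction pvAOuter gs s0 d common with
  | case1 d common h ih =>
    rw [ih, pv_inner_eq]
    simp only [List.drop_zero]
    have hmem0 : s0[d] ∈ s0.drop d := by
      rw [List.drop_eq_getElem_cons h]; exact List.mem_cons_self ..
    by_cases hall : gs.all (·.contains s0[d]) = true
    · rw [if_pos hall]
      apply List.filter_congr
      intro x _
      by_cases hx : x = s0[d]
      · subst hx
        have hallm : (gs.all fun a => decide (s0[d] ∈ a)) = true := by simpa using hall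
        simp [hallm]
      · have hdec : decide (x ∈ s0.drop d) = decide (x ∈ s0.drop (d + 1)) := by
          rw [decide_eq_decide, List.drop_eq_getElem_cons h, List.mem_cons]
          exact ⟨fun hc => hc.resolve_left hx, Or.inr⟩
        simp only [List.contains_eq_mem, hdec]
    · rw [if_neg hall]
      rw [List.filter_filter]
      apply List.filter_congr
      intro x _
      simp only [Bool.not_eq_true] at hall
      have hallm : (gs.all fun a => decide (s0[d] ∈ a)) = false := by simpa using hall
      by_cases hx : x = s0[d]
      · subst hx
        simp [hallm, hmem0]
      · have hdec : decide (x ∈ s0.drop d) = decide (x ∈ s0.drop (d + 1)) := by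
          rw [decide_eq_decide, List.drop_eq_getElem_cons h, List.mem_cons]
          exact ⟨fun hc => hc.resolve_left hx, Or.inr⟩
        simp only [List.contains_eq_mem, hdec]
        simp [hx]
  | case2 d common h =>
    have hd : s0.drop d = [] := List.drop_eq_nil_of_le (by omega)
    simp [hd]

-- membership in B's folded intersection
theorem pv_foldl_inter_mem (l : List String) (acc : PySem.Set Char) (x : Char) :
    x ∈ l.foldl (fun acc a => PySem.Set.inter acc (PySem.Set.ofList a.toList)) acc ↔
      x ∈ acc ∧ ∀ a ∈ l, x ∈ a.toList := by
  induction l generalizing acc with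
  | nil => simp
  | cons a t ih =>
    simp only [List.foldl_cons]
    rw [ih]
    simp only [PySem.Set.mem_inter, PySem.Set.mem_ofList, List.mem_cons]
    constructor
    · rintro ⟨⟨h1, h2⟩, h3⟩
      refine ⟨h1, ?_⟩
      rintro b (rfl | hb)
      · exact h2
      · exact h3 b hb
    · rintro ⟨h1, h2⟩
      exact ⟨⟨h1, h2 a (Or.inl rfl)⟩, fun b hb => h2 b (Or.inr hb)⟩

-- ===== VERDICT (by name: the statement is the Claim_ definition above) =====
theorem check_common_yes_answers_in_group_spec : Claim_equal_check_common_yes_answers_in_group := by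
  intro gs _ _
  unfold Spec_check_common_yes_answers_in_group
  unfold check_common_yes_answers_in_group check_common_yes_answers_in_group_alt
  dsimp only
  rw [pv_outer_eq]
  have hr : (((PySem.List.pyGet? gs 0).getD "").toList).filter
        (fun x => (gs.map String.toList).all (·.contains x) ||
          !(((((PySem.List.pyGet? gs 0).getD "").toList).drop 0).contains x)) =
      (((PySem.List.pyGet? gs 0).getD "").toList).filter
        (fun c => PySem.Set.contains
          (gs.foldl (fun acc a => PySem.Set.inter acc (PySem.Set.ofList a.toList))
            (PySem.Set.ofList ((PySem.List.pyGet? gs 0).getD "").toList)) c) := by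
    apply List.filter_congr
    intro x hx
    have hcx : (((PySem.List.pyGet? gs 0).getD "").toList).contains x = true := by
      simp [hx]
    simp only [List.drop_zero, hcx, Bool.not_true, Bool.or_false]
    rw [Bool.eq_iff_iff]
    rw [PySem.Set.contains_iff, pv_foldl_inter_mem, PySem.Set.mem_ofList]
    simp only [List.all_map, List.all_eq_true, Function.comp_apply, List.contains_eq_mem,
      decide_eq_true_eq]
    constructor
    · intro h; exact ⟨hx, h⟩
    · intro h; exact h.2
  rw [hr]
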